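-- pv_equiv track=rewrite | github.com/kozaka93/2025L-ExploratoryDataAnalysis | tomusiak_twarowski_niedzielewski/Kody/Web Scraping/PART2_Genres_extra_data/genres_filmweb.py | unmarge
-- ===== SOURCE A (Python) =====
-- def unmarge(string):
--     target = ' '
--     if string.count(target) == 3:
--         occurrence = 0
--         new_s = ''
--         for char in string:
--             if char == target:
--                 occurrence += 1
--                 if occurrence == 2:
--                     new_s += '_'
--                 else:
--                     new_s += char
--             else:
--                 new_s += char
--         return new_s
--     else:
--         return string
-- ===== SOURCE B (Python) =====
-- def unmarge(string):
--     if string.count(' ') == 3: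
--         i = string.index(' ', string.index(' ') + 1)
--         return string[:i] + '_' + string[i + 1:]
--     else:
--         return string
-- ===== Notes on version B (the rewrite author's own statement) =====
-- stated objective: simpler
-- what changed: Instead of scanning char by char while counting space occurrences and accumulating a new string, B locates the second space directly with two index() calls and splices the underscore in with slicing.
import Mathlib
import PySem

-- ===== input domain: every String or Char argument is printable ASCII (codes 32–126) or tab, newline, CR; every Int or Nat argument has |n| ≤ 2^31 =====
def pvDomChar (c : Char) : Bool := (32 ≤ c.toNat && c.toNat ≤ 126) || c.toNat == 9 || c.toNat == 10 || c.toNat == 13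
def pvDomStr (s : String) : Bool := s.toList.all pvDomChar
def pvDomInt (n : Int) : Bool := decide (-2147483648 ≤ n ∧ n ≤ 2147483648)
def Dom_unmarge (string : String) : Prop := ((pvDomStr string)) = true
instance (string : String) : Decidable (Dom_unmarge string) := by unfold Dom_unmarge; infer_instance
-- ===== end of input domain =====

-- B replaces A's counting character loop by locating the second space directly (two index() calls) and splicing with slices; objective: simpler.


-- ===== PORT A =====
def unmarge (string : String) : String :=
  let target := ' '
  if PySem.Str.count string " " == 3 then
    let st := string.toList.foldl
      (fun (st : Int × List Char) char =>
        if char == target then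
          let occurrence := st.1 + 1
          if occurrence == 2 then (occurrence, st.2 ++ ['_'])
          else (occurrence, st.2 ++ [char])
        else (st.1, st.2 ++ [char])) ((0 : Int), ([] : List Char))
    String.ofList st.2
  else string

-- ===== PORT B =====
def unmarge_alt (string : String) : String :=
  if PySem.Str.count string " " == 3 then
    let i := PySem.Str.findFrom string " " (PySem.Str.find string " " + 1) none
    String.ofList (PySem.Chars.slice string.toList none (some i) ++
      '_' :: PySem.Chars.slice string.toList (some (i + 1)) none)
  else string

-- ===== PRECONDITION & SPEC =====
def Spec_unmarge (string : String) (out : String) : Prop := out = unmarge_alt string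
instance (string : String) (out : String) : Decidable (Spec_unmarge string out) := by unfold Spec_unmarge; infer_instance

-- ===== CLAIM (what is proved, stated in full; the proofs are below) =====
def Claim_equal_unmarge : Prop := ∀ (string : String), Dom_unmarge string → Spec_unmarge string (unmarge string)

-- ===== LEMMAS AND PROOFS =====

-- A's loop body as a named function of the (occurrence, accumulator) state.
def pvStepA (st : Int × List Char) (char : Char) : Int × List Char :=
  if char == ' ' then
    let occurrence := st.1 + 1
    if occurrence == 2 then (occurrence, st.2 ++ ['_'])
    else (occurrence, st.2 ++ [char])
  else (st.1, st.2 ++ [char])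

-- The string A's loop builds, as a recursion (occ = spaces already seen).
def pvRepl (cs : List Char) (occ : Int) : List Char :=
  match cs with
  | [] => []
  | c :: t =>
    if c = ' ' then (if occ + 1 = 2 then '_' else c) :: pvRepl t (occ + 1)
    else c :: pvRepl t occ

theorem pvFoldA (cs : List Char) (occ : Int) (acc : List Char) :
    (cs.foldl pvStepA (occ, acc)).2 = acc ++ pvRepl cs occ := by
  induction cs generalizing occ acc with
  | nil => simp [pvRepl]
  | cons c t ih =>
    by_cases h : c = ' '
    · subst h
      by_cases h2 : occ + 1 = 2 <;>
        simp [pvStepA, pvRepl, h2, ih, List.append_assoc]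
    · simp [pvStepA, pvRepl, h, ih, List.append_assoc]

theorem pvRepl_of_ge_two (cs : List Char) (occ : Int) (h : 2 ≤ occ) :
    pvRepl cs occ = cs := by
  induction cs generalizing occ with
  | nil => rfl
  | cons c t ih =>
    by_cases hc : c = ' '
    · simp [pvRepl, hc, ih (occ + 1) (by omega), show ¬(occ + 1 = 2) by omega]
    · simp [pvRepl, hc, ih occ h]

theorem pvRepl_one (cs : List Char) (h : ' ' ∈ cs) :
    pvRepl cs 1 = cs.take (cs.idxOf ' ') ++ '_' :: cs.drop (cs.idxOf ' ' + 1) := by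
  induction cs with
  | nil => simp at h
  | cons c t ih =>
    by_cases hc : c = ' '
    · subst hc
      simp [pvRepl, List.idxOf_cons_self, pvRepl_of_ge_two t 2 le_rfl]
    · have ht : ' ' ∈ t := by
        rcases List.mem_cons.mp h with h' | h'
        · exact absurd h'.symm hc
        · exact h'
      simp [pvRepl, hc, List.idxOf_cons_ne _ (by simpa using hc), ih ht]

theorem pvRepl_zero (cs : List Char) (h : ' ' ∈ cs) :
    pvRepl cs 0 = cs.take (cs.idxOf ' ') ++ ' ' :: pvRepl (cs.drop (cs.idxOf ' ' + 1)) 1 := by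
  induction cs with
  | nil => simp at h
  | cons c t ih =>
    by_cases hc : c = ' '
    · subst hc
      simp [pvRepl, List.idxOf_cons_self]
    · have ht : ' ' ∈ t := by
        rcases List.mem_cons.mp h with h' | h'
        · exact absurd h'.symm hc
        · exact h'
      simp [pvRepl, hc, List.idxOf_cons_ne _ (by simpa using hc), ih ht]

-- single-character substring count is List.count (no PySem lemma covers this case)
theorem pvCountGo (cs : List Char) (fuel acc : Nat) (hf : cs.length ≤ fuel) :
    PySem.Chars.count.go [' '] fuel cs acc = acc + cs.count ' ' := by
  induction cs generalizing fuel acc with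
  | nil => cases fuel <;> simp [PySem.Chars.count.go]
  | cons c t ih =>
    cases fuel with
    | zero => simp at hf
    | succ f =>
      by_cases hc : c = ' '
      · subst hc
        simpa [PySem.Chars.count.go, List.isPrefixOf, List.count_cons, Nat.add_comm,
          Nat.add_assoc, Nat.add_left_comm] using ih f (acc + 1) (by simpa using hf)
      · have hp : [' '].isPrefixOf (c :: t) = false := by
          simp [List.isPrefixOf]
          intro hh; exact hc hh.symm
        simp [PySem.Chars.count.go, hp, hc, ih f acc (by simpa using hf)]

theorem pvCountSingle (cs : List Char) :
    PySem.Chars.count cs [' '] = cs.count ' ' := by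
  simpa [PySem.Chars.count] using pvCountGo cs cs.length 0 le_rfl

theorem pvPrefixSingleton (cs : List Char) (i : Nat) :
    [' '] <+: cs.drop i ↔ cs[i]? = some ' ' := by
  rw [← List.head?_drop]
  generalize cs.drop i = l
  cases l with
  | nil => simp
  | cons b t => simp [List.cons_prefix_cons, eq_comm]

theorem pvFindSingle (cs : List Char) (h : ' ' ∈ cs) :
    PySem.Chars.find cs [' '] = (cs.idxOf ' ' : Int) := by
  have hmemget : cs[cs.idxOf ' ']? = some ' ' := List.getElem?_idxOf h
  have hinf : [' '] <:+: cs := by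
    rw [List.infix_iff_prefix_suffix]
    exact ⟨cs.drop (cs.idxOf ' '), (pvPrefixSingleton cs _).mpr hmemget, List.drop_suffix _ _⟩
  have hne := (PySem.Chars.find_ne_neg_one_iff cs [' ']).mpr hinf
  have hge : (0 : Int) ≤ PySem.Chars.find cs [' '] := by
    have := PySem.Chars.neg_one_le_find cs [' ']
    omega
  obtain ⟨hpre, hmin⟩ := PySem.Chars.find_spec hge
  set j := (PySem.Chars.find cs [' ']).toNat with hj
  have hjget : cs[j]? = some ' ' := (pvPrefixSingleton cs j).mp hpre
  have hjlt : j < cs.length := by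
    by_contra hnot
    rw [List.getElem?_eq_none_iff.mpr (by omega)] at hjget
    simp at hjget
  have h1 : cs.idxOf ' ' ≤ j := by
    have hv : cs[j] = ' ' := by
      have := List.getElem?_eq_getElem hjlt
      rw [this] at hjget
      exact Option.some.inj hjget
    have hlen : j < (cs.take (j + 1)).length := by
      simp [List.length_take]; omega
    have hmemtk : ' ' ∈ cs.take (j + 1) := by
      rw [List.mem_iff_getElem]
      exact ⟨j, hlen, by rw [List.getElem_take, hv]⟩
    have := (List.mem_take_iff_idxOf_lt h).mp hmemtk
    omega
  have h2 : j ≤ cs.idxOf ' ' := by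
    by_contra hnot
    exact hmin (cs.idxOf ' ') (by omega) ((pvPrefixSingleton cs _).mpr hmemget)
  have hjeq : j = cs.idxOf ' ' := le_antisymm h2 h1
  omega

-- ===== VERDICT (by name: the statement is the Claim_ definition above) =====
theorem unmarge_spec : Claim_equal_unmarge := by
  intro string _
  unfold Spec_unmarge unmarge unmarge_alt
  by_cases hg : (PySem.Str.count string " " == 3) = true
  · simp only [hg, if_pos]
    set cs := string.toList with hcs
    -- the guard gives count ' ' cs = 3
    have hcount : cs.count ' ' = 3 := by
      have := (beq_iff_eq).mp hg
      rwa [PySem.Str.count_eq, show (" " : String).toList = [' '] from rfl, pvCountSingle] at this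
    have hmem : ' ' ∈ cs := List.count_pos_iff.mp (by omega)
    set n1 := cs.idxOf ' ' with hn1
    have hn1lt : n1 < cs.length := List.idxOf_lt_length_of_mem hmem
    have hgetn1 : cs[n1]? = some ' ' := List.getElem?_idxOf hmem
    set d := cs.drop (n1 + 1) with hd
    -- take (n1+1) cs = take n1 cs ++ [' ']
    have htake1 : cs.take (n1 + 1) = cs.take n1 ++ [' '] := by
      rw [List.take_add_one, hgetn1]; rfl
    -- the second space exists: count d ≥ 1
    have hmemd : ' ' ∈ d := by
      have hsplit : cs = cs.take (n1 + 1) ++ d := (List.take_append_drop _ _).symm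
      have hnottake : ' ' ∉ cs.take n1 := by
        intro hmt
        have := (List.mem_take_iff_idxOf_lt hmem).mp hmt
        omega
      have hcnt : cs.count ' ' = (cs.take n1 ++ [' ']).count ' ' + d.count ' ' := by
        conv_lhs => rw [hsplit, htake1]
        rw [List.count_append]
      have hcnt1 : (cs.take n1 ++ [' ']).count ' ' = 1 := by
        rw [List.count_append]
        simp [List.count_eq_zero_of_not_mem hnottake]
      rw [hcnt, hcnt1] at hcount
      exact List.count_pos_iff.mp (by omega)
    set m := d.idxOf ' ' with hm
    have hmlt : m < d.length := List.idxOf_lt_length_of_mem hmemd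
    -- B's index i equals n1 + 1 + m
    have hfind : PySem.Str.find string " " = (n1 : Int) := by
      rw [show PySem.Str.find string " " = PySem.Chars.find cs [' '] from rfl]
      exact pvFindSingle cs hmem
    have hfindd : PySem.Chars.find d [' '] = (m : Int) := pvFindSingle d hmemd
    have hi : PySem.Str.findFrom string " " (PySem.Str.find string " " + 1) none
        = ((n1 + 1 + m : Nat) : Int) := by
      rw [show PySem.Str.findFrom string " " (PySem.Str.find string " " + 1) none
          = PySem.Chars.findFrom cs [' '] (PySem.Str.find string " " + 1) none from rfl]
      rw [hfind, show ((n1 : Int) + 1) = ((n1 + 1 : Nat) : Int) by push_cast; ring]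
      rw [PySem.Chars.findFrom_natCast cs [' '] (n1 + 1) (by omega)]
      rw [← hd, hfindd]
      have : ((m : Int)) ≠ -1 := by omega
      simp only [this]
      push_cast; ring
    rw [hi]
    -- slices become take / drop
    rw [show PySem.Chars.slice cs none (some ((n1 + 1 + m : Nat) : Int))
        = cs.take (n1 + 1 + m) from by
      rw [PySem.Chars.slice_eq_listSlice, PySem.List.slice_to _ (by positivity)]
      congr 1]
    rw [show PySem.Chars.slice cs (some (((n1 + 1 + m : Nat) : Int) + 1)) none
        = cs.drop (n1 + 1 + m + 1) from by
      rw [PySem.Chars.slice_eq_listSlice,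
        show (((n1 + 1 + m : Nat) : Int) + 1) = ((n1 + 1 + m + 1 : Nat) : Int) by push_cast; ring,
        PySem.List.slice_from _ (by positivity)]
      congr 1]
    -- A's loop result via pvRepl
    have hstep : (fun (st : Int × List Char) char =>
        if char == ' ' then
          let occurrence := st.1 + 1
          if occurrence == 2 then (occurrence, st.2 ++ ['_'])
          else (occurrence, st.2 ++ [char])
        else (st.1, st.2 ++ [char])) = pvStepA := rfl
    rw [hstep, pvFoldA cs 0 []]
    -- characterize pvRepl cs 0
    rw [pvRepl_zero cs hmem, ← hn1, ← hd, pvRepl_one d hmemd, ← hm]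
    -- and the take/drop algebra
    have htake : cs.take (n1 + 1 + m) = cs.take n1 ++ ' ' :: d.take m := by
      rw [show n1 + 1 + m = (n1 + 1) + m by ring, List.take_add, ← hd, htake1]
      simp
    have hdrop : cs.drop (n1 + 1 + m + 1) = d.drop (m + 1) := by
      rw [hd, List.drop_drop]
      congr 1
    rw [htake, hdrop]
    simp
  · simp only [hg]
    simp
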